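-- pv_equiv track=rewrite | github.com/StealthStop/Analyzer | Analyzer/test/Tools/makeFilelist.py | makeNiceName
-- ===== SOURCE A (Python) =====
-- def makeNiceName(oldname):
--     chunks = oldname.split("_")
--     endpoint = 0
--     extra = ""
--     for chunk in chunks:
--         if "TuneCP5" in chunk:
--             if chunk != "TuneCP5":
--                 endpoint += 1
--             break
--
--         if "erdON" in oldname:
--             extra = "_erdON"
--
--         endpoint += 1
--
--     return "_".join(chunks[0:endpoint]).replace("_NLO", "") + extra
-- ===== SOURCE B (Python) =====
-- MARKER = "TuneCP5"
--
-- def makeNiceName(oldname):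
--     p = oldname.find(MARKER)
--     if p < 0:
--         kept = oldname
--     else:
--         q = oldname.find("_", p)
--         end = len(oldname) if q < 0 else q
--         if (p == 0 or oldname[p - 1] == "_") and end == p + len(MARKER):
--             # the marker is a whole '_'-delimited field: drop it and its leading '_'
--             kept = oldname[:p - 1] if p > 0 else ""
--         else:
--             # the marker sits inside a larger field: keep the name through that field
--             kept = oldname[:end]
--     extra = "_erdON" if "erdON" in oldname else ""
--     return kept.replace("_NLO", "") + extra
-- ===== Notes on version B (the rewrite author's own statement) =====
-- stated objective: alternative
-- what changed: Instead of splitting the name on '_' and looping over chunks with endpoint/extra accumulators, B never builds the chunk list: it locates the first 'TuneCP5' occurrence by string index (find), finds the enclosing field's boundaries via the neighbouring '_' characters, and cuts the name with a single slice.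
-- intended difference: On names whose first '_'-separated field contains 'TuneCP5' while 'erdON' occurs in the name, A's loop breaks before ever setting extra and returns the cleaned prefix without '_erdON', while B appends '_erdON' whenever 'erdON' occurs in the name, which is the intended tagging. — e.g. on makeNiceName("TuneCP5_erdON"): A returns "", B returns "_erdON"
import Mathlib
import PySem

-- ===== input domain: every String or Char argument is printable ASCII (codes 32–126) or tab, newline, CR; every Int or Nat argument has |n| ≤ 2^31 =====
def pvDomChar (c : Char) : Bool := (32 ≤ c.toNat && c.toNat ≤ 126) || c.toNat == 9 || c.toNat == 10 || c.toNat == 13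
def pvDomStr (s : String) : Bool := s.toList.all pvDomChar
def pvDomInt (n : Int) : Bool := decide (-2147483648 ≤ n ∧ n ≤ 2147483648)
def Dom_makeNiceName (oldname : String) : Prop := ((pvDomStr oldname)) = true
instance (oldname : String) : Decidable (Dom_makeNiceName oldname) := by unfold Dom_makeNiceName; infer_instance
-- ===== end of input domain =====

-- B abandons A's split-into-chunks loop: it locates the "TuneCP5" marker by string index
-- arithmetic (find / boundary characters / one slice) and never builds the chunk list
-- (objective: alternative algorithm, same cost). B intentionally appends "_erdON" whenever
-- "erdON" occurs in the name (see D_ below).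

-- ===== PORT A =====
-- the for-loop of A: state (endpoint, extra), early exit on a chunk containing "TuneCP5"
def mnLoopA (oldname : String) : List String → Int → String → Int × String
  | [], ep, ex => (ep, ex)
  | c :: cs, ep, ex =>
    if PySem.Str.isIn "TuneCP5" c then
      (if c ≠ "TuneCP5" then ep + 1 else ep, ex)
    else
      mnLoopA oldname cs (ep + 1) (if PySem.Str.isIn "erdON" oldname then "_erdON" else ex)

def makeNiceName (oldname : String) : String :=
  let chunks := (PySem.Str.split? oldname "_").getD []   -- sep "_" ≠ "", so split? is always `some`
  let r := mnLoopA oldname chunks 0 ""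
  PySem.Str.replace (PySem.Str.join "_" (PySem.List.slice chunks (some 0) (some r.1))) "_NLO" "" ++ r.2

-- ===== PORT B =====
def makeNiceName_alt (oldname : String) : String :=
  let p := PySem.Str.find oldname "TuneCP5"
  let kept : String :=
    if p < 0 then oldname
    else
      let q := PySem.Str.findFrom oldname "_" p
      let e : Int := if q < 0 then PySem.Str.len oldname else q
      if (p = 0 ∨ PySem.Str.pyGet? oldname (p - 1) = some '_') ∧ e = p + PySem.Str.len "TuneCP5" then
        if 0 < p then PySem.Str.slice oldname none (some (p - 1)) else ""
      else
        PySem.Str.slice oldname none (some e)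
  let extra := if PySem.Str.isIn "erdON" oldname then "_erdON" else ""
  PySem.Str.replace kept "_NLO" "" ++ extra

-- ===== PRECONDITION & SPEC =====
-- On names whose first '_'-separated field contains "TuneCP5" while "erdON" occurs in the
-- name, A's loop breaks before ever setting extra and returns the cleaned prefix WITHOUT
-- "_erdON", while B appends "_erdON" whenever "erdON" occurs — the intended tagging.
def D_makeNiceName (oldname : String) : Prop :=
  PySem.Str.isIn "erdON" oldname = true ∧
  PySem.Chars.isIn "TuneCP5".toList (oldname.toList.takeWhile (fun c => c != '_')) = true
instance (oldname : String) : Decidable (D_makeNiceName oldname) := by unfold D_makeNiceName; infer_instance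

def Spec_makeNiceName (oldname : String) (out : String) : Prop := ¬ D_makeNiceName oldname → out = makeNiceName_alt oldname
instance (oldname : String) (out : String) : Decidable (Spec_makeNiceName oldname out) := by unfold Spec_makeNiceName; infer_instance

def pvDiffWitness_makeNiceName : String := "TuneCP5_erdON"
def pvDiffWitnessOut_makeNiceName : String × String := ("", "_erdON")

-- ===== CLAIM =====
def Claim_unchanged_makeNiceName : Prop := ∀ (oldname : String), Dom_makeNiceName oldname → Spec_makeNiceName oldname (makeNiceName oldname)
def Claim_changed_makeNiceName : Prop := Dom_makeNiceName (pvDiffWitness_makeNiceName) ∧ D_makeNiceName (pvDiffWitness_makeNiceName) ∧ makeNiceName (pvDiffWitness_makeNiceName) = pvDiffWitnessOut_makeNiceName.1 ∧ makeNiceName_alt (pvDiffWitness_makeNiceName) = pvDiffWitnessOut_makeNiceName.2 ∧ pvDiffWitnessOut_makeNiceName.1 ≠ pvDiffWitnessOut_makeNiceName.2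
def Claim_exact_makeNiceName : Prop := ∀ (oldname : String), Dom_makeNiceName oldname → D_makeNiceName oldname → makeNiceName oldname ≠ makeNiceName_alt oldname

-- ===== LEMMAS AND PROOFS =====

-- the marker, as characters
def mnM : List Char := "TuneCP5".toList

-- A clean structural version of splitOn on the single-character separator '_'
def splitU : List Char → List (List Char)
  | [] => [[]]
  | c :: t => if c = '_' then [] :: splitU t
              else match splitU t with
                   | h :: r => (c :: h) :: r
                   | [] => [[c]]

theorem splitU_ne_nil (s : List Char) : splitU s ≠ [] := by
  induction s with
  | nil => simp [splitU]
  | cons c t ih =>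
    simp only [splitU]
    split_ifs
    · simp
    · cases h : splitU t <;> simp

theorem splitU_go (fuel : Nat) (l cur : List Char) (acc : List (List Char)) (h : l.length < fuel) :
    PySem.Chars.splitOn.go ['_'] fuel l cur acc =
      acc.reverse ++ (match splitU l with
                      | h :: r => (cur.reverse ++ h) :: r
                      | [] => [cur.reverse]) := by
  induction fuel generalizing l cur acc with
  | zero => omega
  | succ fuel ih =>
    cases l with
    | nil => rw [PySem.Chars.splitOn.go] <;> simp [splitU] <;> omega
    | cons c rest =>
      rw [PySem.Chars.splitOn.go]
      by_cases hc : c = '_'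
      · have hpre : List.isPrefixOf ['_'] (c :: rest) = true := by
          simp [List.isPrefixOf, hc]
        rw [if_pos hpre, ih _ _ _ (by simp at h ⊢; omega)]
        simp only [splitU, if_pos hc, List.drop_succ_cons, List.drop_zero]
        cases hs : splitU rest with
        | nil => exact absurd hs (splitU_ne_nil rest)
        | cons h' r' => simp [hs]
      · have hpre : List.isPrefixOf ['_'] (c :: rest) = false := by
          simp only [List.isPrefixOf, List.isPrefixOf_nil_left, Bool.and_true, beq_iff_eq]
          exact decide_eq_false (fun h' => hc h'.symm)
        rw [if_neg (by simp [hpre]), ih _ _ _ (by simp at h ⊢; omega)]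
        simp only [splitU, if_neg hc]
        cases hs : splitU rest with
        | nil => exact absurd hs (splitU_ne_nil rest)
        | cons h' r' => simp [hs]

theorem splitU_eq (s : List Char) : PySem.Chars.splitOn s ['_'] = splitU s := by
  unfold PySem.Chars.splitOn
  rw [splitU_go _ _ _ _ (by omega)]
  cases hs : splitU s with
  | nil => exact absurd hs (splitU_ne_nil s)
  | cons h r => simp

theorem chunks_eq (oldname : String) :
    (PySem.Str.split? oldname "_").getD [] = (splitU oldname.toList).map String.ofList := by
  have : ("_" : String).toList = ['_'] := rfl
  simp [PySem.Str.split?, PySem.Chars.split?, this, splitU_eq]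

theorem splitU_no_sep (s : List Char) (h : '_' ∉ s) : splitU s = [s] := by
  induction s with
  | nil => rfl
  | cons c t ih =>
    simp only [List.mem_cons, not_or] at h
    simp only [splitU, if_neg (Ne.symm h.1), ih h.2]

theorem splitU_append (ch t : List Char) (h : '_' ∉ ch) :
    splitU (ch ++ '_' :: t) = ch :: splitU t := by
  induction ch with
  | nil => simp [splitU]
  | cons c ch ih =>
    simp only [List.mem_cons, not_or] at h
    simp only [List.cons_append, splitU, if_neg (Ne.symm h.1), ih h.2]

theorem takeWhile_no_sep (s : List Char) (h : '_' ∉ s) : s.takeWhile (fun c => c != '_') = s := by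
  induction s with
  | nil => rfl
  | cons c t ih =>
    simp only [List.mem_cons, not_or] at h
    simp [List.takeWhile_cons, Ne.symm h.1, ih h.2]

-- decomposition of a string containing '_'
theorem exists_decomp (s : List Char) (h : '_' ∈ s) :
    ∃ ch t, s = ch ++ '_' :: t ∧ '_' ∉ ch ∧ ch = s.takeWhile (fun c => c != '_') := by
  induction s with
  | nil => simp at h
  | cons c t ih =>
    by_cases hc : c = '_'
    · exact ⟨[], t, by simp [hc], by simp, by simp [List.takeWhile_cons, hc]⟩
    · have ht : '_' ∈ t := by
        rcases List.mem_cons.mp h with h' | h'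
        · exact absurd h'.symm hc
        · exact h'
      obtain ⟨ch, t', he, hn, htw⟩ := ih ht
      exact ⟨c :: ch, t', by simp [he], by simp [hn, Ne.symm hc, hc],
        by simp [List.takeWhile_cons, hc]; exact htw⟩

-- characterization of Chars.find
theorem single_prefix (a : Char) (w : List Char) : [a] <+: w ↔ w[0]? = some a := by
  cases w with
  | nil => simp
  | cons b u => simp [List.cons_prefix_cons, eq_comm]

theorem find_eq_of (s sub : List Char) (k : Nat) (h1 : sub <+: s.drop k)
    (h2 : ∀ i < k, ¬ sub <+: s.drop i) : PySem.Chars.find s sub = (k : Int) := by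
  have hinf : sub <:+: s := List.IsInfix.trans h1.isInfix (List.drop_suffix k s).isInfix
  have h0 : 0 ≤ PySem.Chars.find s sub := (PySem.Chars.find_nonneg_iff s sub).mpr hinf
  obtain ⟨hp, hmin⟩ := PySem.Chars.find_spec h0
  have htn := Int.toNat_of_nonneg h0
  rcases lt_trichotomy (PySem.Chars.find s sub).toNat k with h | h | h
  · exact absurd hp (h2 _ h)
  · omega
  · exact absurd h1 (hmin k h)

-- occurrences transfer between a list and a prefix of it
theorem prefix_occ_out (ch s sub : List Char) (hp : ch <+: s) (i : Nat)
    (h : sub <+: ch.drop i) : sub <+: s.drop i := h.trans (hp.drop i)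

theorem prefix_occ_in (ch s sub : List Char) (hp : ch <+: s) (i : Nat)
    (hlen : i + sub.length ≤ ch.length) (h : sub <+: s.drop i) : sub <+: ch.drop i := by
  have hch : ch = s.take ch.length := List.prefix_iff_eq_take.mp hp
  have hsub : sub = (s.drop i).take sub.length := List.prefix_iff_eq_take.mp h
  have hchd : ch.drop i = (s.drop i).take (ch.length - i) := by
    conv_lhs => rw [hch]
    rw [List.drop_take]
  rw [List.prefix_iff_eq_take]
  calc sub = (s.drop i).take sub.length := hsub
    _ = ((s.drop i).take (ch.length - i)).take sub.length := by
        rw [List.take_take, min_eq_left (by omega)]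
    _ = (ch.drop i).take sub.length := by rw [hchd]

-- no occurrence of mnM can start inside ch when ch is marker-free (straddling is impossible: '_' ∉ mnM)
theorem straddle (ch t : List Char) (hch : ¬ mnM <:+: ch) (i : Nat) (hi : i ≤ ch.length) :
    ¬ mnM <+: (ch ++ '_' :: t).drop i := by
  intro h
  have hM7 : mnM.length = 7 := rfl
  by_cases hlen : i + 7 ≤ ch.length
  · have hin : mnM <+: ch.drop i :=
      prefix_occ_in ch (ch ++ '_' :: t) mnM (List.prefix_append ch _) i (by omega) h
    exact hch (List.IsInfix.trans hin.isInfix (List.drop_suffix i ch).isInfix)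
  · have hj : ch.length - i < mnM.length := by omega
    have hw : ch.length - i < ((ch ++ '_' :: t).drop i).length := by
      have := h.length_le; omega
    have hg := h.getElem hj
    have hval : ((ch ++ '_' :: t).drop i)[ch.length - i]'hw = '_' := by
      rw [List.getElem_drop]
      rw [List.getElem_append_right (by omega)]
      simp [Nat.sub_eq_zero_of_le, show i + (ch.length - i) - ch.length = 0 by omega]
    have hm : mnM[ch.length - i]'hj = '_' := hg.trans hval
    have : '_' ∈ mnM := hm ▸ List.getElem_mem hj
    exact absurd this (by decide)

theorem find_confine (ch s : List Char) (hp : ch <+: s) (h : 0 ≤ PySem.Chars.find ch mnM) :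
    PySem.Chars.find s mnM = PySem.Chars.find ch mnM := by
  have hM7 : mnM.length = 7 := rfl
  obtain ⟨h1, h2⟩ := PySem.Chars.find_spec h
  have hple : (PySem.Chars.find ch mnM).toNat + 7 ≤ ch.length := by
    have := h1.length_le; simp [List.length_drop] at this; omega
  have := find_eq_of s mnM (PySem.Chars.find ch mnM).toNat
    (prefix_occ_out ch s mnM hp _ h1)
    (fun i hi hc => h2 i hi (prefix_occ_in ch s mnM hp i (by omega) hc))
  rw [this, Int.toNat_of_nonneg h]

theorem find_shift (ch t : List Char) (hch : ¬ mnM <:+: ch) :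
    PySem.Chars.find (ch ++ '_' :: t) mnM =
      (if PySem.Chars.find t mnM = -1 then -1 else (ch.length : Int) + 1 + PySem.Chars.find t mnM) := by
  have hM7 : mnM.length = 7 := rfl
  split_ifs with h
  · rw [PySem.Chars.find_eq_neg_one_iff] at h ⊢
    intro hinf
    obtain ⟨i, hpre⟩ := (PySem.Chars.exists_prefix_drop_iff_isIn mnM _).mpr
      ((PySem.Chars.isIn_iff_infix mnM _).mpr hinf)
    by_cases hi : i ≤ ch.length
    · exact straddle ch t hch i hi hpre
    · apply h
      apply List.IsInfix.trans hpre.isInfix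
      have : (ch ++ '_' :: t).drop i = t.drop (i - ch.length - 1) := by
        rw [List.drop_append]
        rw [List.drop_eq_nil_of_le (by omega), List.nil_append]
        rw [show i - ch.length = (i - ch.length - 1) + 1 by omega, List.drop_succ_cons]
        congr 1
      rw [this]
      exact (List.drop_suffix _ t).isInfix
  · have h0 : 0 ≤ PySem.Chars.find t mnM := by
      have := PySem.Chars.neg_one_le_find t mnM; omega
    obtain ⟨h1, h2⟩ := PySem.Chars.find_spec h0
    set pt := (PySem.Chars.find t mnM).toNat with hpt
    have := find_eq_of (ch ++ '_' :: t) mnM (ch.length + 1 + pt) ?_ ?_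
    · rw [this, ← Int.toNat_of_nonneg h0, ← hpt]; push_cast; ring
    · have : (ch ++ '_' :: t).drop (ch.length + 1 + pt) = t.drop pt := by
        rw [List.drop_append, List.drop_eq_nil_of_le (by omega), List.nil_append]
        rw [show ch.length + 1 + pt - ch.length = pt + 1 by omega, List.drop_succ_cons]
      rw [this]; exact h1
    · intro i hi hc
      by_cases hile : i ≤ ch.length
      · exact straddle ch t hch i hile hc
      · apply h2 (i - ch.length - 1) (by omega)
        have : (ch ++ '_' :: t).drop i = t.drop (i - ch.length - 1) := by
          rw [List.drop_append, List.drop_eq_nil_of_le (by omega), List.nil_append]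
          rw [show i - ch.length = (i - ch.length - 1) + 1 by omega, List.drop_succ_cons]
          congr 1
        rwa [this] at hc

-- A's endpoint (number of chunks kept), characterized chunk by chunk
def epC : List (List Char) → Nat
  | [] => 0
  | c :: cs => if PySem.Chars.isIn mnM c then (if c = mnM then 0 else 1) else 1 + epC cs

def epN (s : List Char) : Nat := epC (splitU s)

theorem inter_cons (ch : List Char) (l : List (List Char)) (h : l ≠ []) :
    List.intercalate ['_'] (ch :: l) = ch ++ '_' :: List.intercalate ['_'] l := by
  cases l with
  | nil => exact absurd rfl h
  | cons y l => simp [List.intercalate]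

theorem roundtrip_fuel (n : Nat) : ∀ s : List Char, s.length ≤ n →
    List.intercalate ['_'] (splitU s) = s := by
  induction n with
  | zero =>
    intro s h
    have : s = [] := List.eq_nil_of_length_eq_zero (by omega)
    subst this; simp [splitU, List.intercalate]
  | succ n ih =>
    intro s h
    by_cases hm : '_' ∈ s
    · obtain ⟨ch, t, he, hn, -⟩ := exists_decomp s hm
      subst he
      rw [splitU_append _ _ hn, inter_cons _ _ (splitU_ne_nil t),
        ih t (by simp at h; omega)]
    · simp [splitU_no_sep s hm, List.intercalate]

theorem roundtrip (s : List Char) : List.intercalate ['_'] (splitU s) = s :=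
  roundtrip_fuel s.length s le_rfl

theorem chunks_infix_fuel (n : Nat) : ∀ s : List Char, s.length ≤ n →
    ∀ c ∈ splitU s, c <:+: s := by
  induction n with
  | zero =>
    intro s h c hc
    have : s = [] := List.eq_nil_of_length_eq_zero (by omega)
    subst this; simp [splitU] at hc; simp [hc]
  | succ n ih =>
    intro s h c hc
    by_cases hm : '_' ∈ s
    · obtain ⟨ch, t, he, hn, -⟩ := exists_decomp s hm
      subst he
      rw [splitU_append _ _ hn] at hc
      rcases List.mem_cons.mp hc with rfl | hc
      · exact (List.prefix_append c _).isInfix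
      · exact (ih t (by simp at h; omega) c hc).trans
          (((List.suffix_cons '_' t).trans (List.suffix_append _ _)).isInfix)
    · rw [splitU_no_sep s hm] at hc
      simp at hc; simp [hc]

theorem chunks_infix (s : List Char) : ∀ c ∈ splitU s, c <:+: s :=
  chunks_infix_fuel s.length s le_rfl

theorem epC_zero_iff (c : List Char) (cs : List (List Char)) :
    epC (c :: cs) = 0 ↔ c = mnM := by
  by_cases hin : PySem.Chars.isIn mnM c
  · simp only [epC, if_pos hin]
    constructor
    · intro h; by_cases hc : c = mnM
      · exact hc
      · simp [hc] at h
    · intro h; simp [h]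
  · have : c ≠ mnM := by
      rintro rfl
      exact hin (by decide)
    simp [epC, hin, this]

theorem epC_full (cs : List (List Char)) (h : ∀ c ∈ cs, ¬ PySem.Chars.isIn mnM c) :
    epC cs = cs.length := by
  induction cs with
  | nil => rfl
  | cons c cs ih =>
    simp only [epC, if_neg (h c (by simp))]
    rw [ih (fun c hc => h c (by simp [hc]))]
    simp; omega

theorem find_sep_none (s : List Char) (h : '_' ∉ s) : PySem.Chars.find s ['_'] = -1 :=
  (PySem.Chars.find_eq_neg_one_iff s ['_']).mpr (fun hinf => h (hinf.subset (by simp)))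

theorem find_sep_append (ch t : List Char) (h : '_' ∉ ch) :
    PySem.Chars.find (ch ++ '_' :: t) ['_'] = (ch.length : Int) := by
  apply find_eq_of
  · rw [show (ch ++ '_' :: t).drop ch.length = '_' :: t from by
      rw [List.drop_append_of_le_length le_rfl, List.drop_length, List.nil_append]]
    exact ⟨t, rfl⟩
  · intro i hi
    rw [single_prefix]
    rw [List.getElem?_drop, Nat.add_zero, List.getElem?_append_left hi,
      List.getElem?_eq_getElem hi]
    intro hc
    exact h (by rw [show ('_' : Char) = ch[i] from by injection hc with hh; exact hh.symm]; exact List.getElem_mem hi)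

-- B's kept prefix, at character level
def keptC (s : List Char) : List Char :=
  let p := PySem.Chars.find s mnM
  if p < 0 then s
  else
    let q := PySem.Chars.findFrom s ['_'] p
    let e : Int := if q < 0 then (s.length : Int) else q
    if (p = 0 ∨ s[(p - 1).toNat]? = some '_') ∧ e = p + 7 then
      (if 0 < p then s.take (p - 1).toNat else [])
    else s.take e.toNat

theorem drop_mid (ch t : List Char) (j : Nat) :
    (ch ++ '_' :: t).drop (ch.length + 1 + j) = t.drop j := by
  rw [List.drop_append, List.drop_eq_nil_of_le (by omega), List.nil_append,
    show ch.length + 1 + j - ch.length = j + 1 by omega, List.drop_succ_cons]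

theorem take_step (ch t : List Char) (j : Nat) :
    (ch ++ '_' :: t).take (ch.length + 1 + j) = ch ++ '_' :: t.take j := by
  rw [List.take_append, List.take_of_length_le (by omega),
    show ch.length + 1 + j - ch.length = j + 1 by omega, List.take_succ_cons]

theorem getElem?_left (ch t : List Char) (i : Nat) (hi : i < ch.length) :
    (ch ++ '_' :: t)[i]? = some (ch[i]'hi) := by
  rw [List.getElem?_append_left hi, List.getElem?_eq_getElem hi]

theorem getElem?_mid (ch t : List Char) : (ch ++ '_' :: t)[ch.length]? = some '_' := by
  rw [List.getElem?_append_right le_rfl]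
  simp

theorem getElem?_right (ch t : List Char) (j : Nat) :
    (ch ++ '_' :: t)[ch.length + 1 + j]? = t[j]? := by
  rw [List.getElem?_append_right (by omega)]
  rw [show ch.length + 1 + j - ch.length = j + 1 by omega]
  simp

-- decomposing a string at its first separator, from the value of find
theorem sep_decomp (t : List Char) (j : Nat) (h : PySem.Chars.find t ['_'] = (j : Int)) :
    t = t.take j ++ '_' :: t.drop (j + 1) ∧ '_' ∉ t.take j := by
  have h0 : 0 ≤ PySem.Chars.find t ['_'] := by omega
  obtain ⟨h1, h2⟩ := PySem.Chars.find_spec h0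
  rw [h] at h1 h2
  simp only [Int.toNat_natCast] at h1 h2
  have hjlen : j < t.length := by
    have := h1.length_le
    simp at this
    omega
  constructor
  · have hget : t[j] = '_' := by
      have := (single_prefix '_' (t.drop j)).mp h1
      rw [List.getElem?_drop, Nat.add_zero, List.getElem?_eq_getElem hjlen] at this
      injection this with hh
    conv_lhs => rw [← List.take_append_drop j t]
    rw [List.drop_eq_getElem_cons hjlen, hget]
  · intro hmem
    obtain ⟨i, hi, hgi⟩ := List.getElem_of_mem hmem
    have hilt : i < j := by
      have := List.length_take_le j t
      have h2' := hi
      simp at h2'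
      omega
    apply h2 i hilt
    rw [single_prefix, List.getElem?_drop, Nat.add_zero,
      List.getElem?_eq_getElem (by omega)]
    rw [List.getElem_take] at hgi
    rw [hgi]

-- MAIN: A's kept prefix equals B's kept prefix, on every string
theorem splitU_head (t : List Char) (h0 : List Char) (r : List (List Char)) (h : splitU t = h0 :: r) :
    '_' ∉ h0 ∧ (t = h0 ∨ ∃ t2, t = h0 ++ '_' :: t2) := by
  by_cases hmt : '_' ∈ t
  · obtain ⟨c2, t2, he2, hn2, -⟩ := exists_decomp t hmt
    rw [he2, splitU_append c2 t2 hn2] at h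
    injection h with hh1 hh2
    subst hh1
    exact ⟨hn2, Or.inr ⟨t2, he2⟩⟩
  · rw [splitU_no_sep t hmt] at h
    injection h with hh1 hh2
    subst hh1
    exact ⟨hmt, Or.inl rfl⟩

theorem keptC_eval (s : List Char) (p : Nat) (hp : PySem.Chars.find s mnM = (p : Int)) (e : Int)
    (he : (if PySem.Chars.findFrom s ['_'] ((p : Nat) : Int) < 0 then (s.length : Int)
           else PySem.Chars.findFrom s ['_'] ((p : Nat) : Int)) = e) :
    keptC s = if (((p : Nat) : Int) = 0 ∨ s[(((p : Nat) : Int) - 1).toNat]? = some '_') ∧ e = ((p : Nat) : Int) + 7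
              then (if 0 < ((p : Nat) : Int) then s.take (((p : Nat) : Int) - 1).toNat else [])
              else s.take e.toNat := by
  simp only [keptC, hp, he]
  rw [if_neg (by omega : ¬ ((p : Nat) : Int) < 0)]

theorem main_fuel (n : Nat) : ∀ s : List Char, s.length ≤ n →
    List.intercalate ['_'] ((splitU s).take (epN s)) = keptC s := by
  induction n with
  | zero =>
    intro s h
    have : s = [] := List.eq_nil_of_length_eq_zero (by omega)
    subst this; decide
  | succ n ih =>
    intro s hlen
    have hM7 : mnM.length = 7 := rfl
    by_cases hm : '_' ∈ s
    case neg =>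
      rw [epN, splitU_no_sep s hm]
      by_cases hM : PySem.Chars.isIn mnM s = true
      case neg =>
        have hp : PySem.Chars.find s mnM = -1 :=
          (PySem.Chars.find_eq_neg_one_iff s mnM).mpr
            (fun hi => hM ((PySem.Chars.isIn_iff_infix mnM s).mpr hi))
        simp [keptC, hp, epC, hM, List.intercalate]
      case pos =>
        have h0 : 0 ≤ PySem.Chars.find s mnM :=
          (PySem.Chars.find_nonneg_iff s mnM).mpr ((PySem.Chars.isIn_iff_infix mnM s).mp hM)
        obtain ⟨h1, h2⟩ := PySem.Chars.find_spec h0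
        set p : Nat := (PySem.Chars.find s mnM).toNat with hpdef
        have hp : PySem.Chars.find s mnM = (p : Int) := (Int.toNat_of_nonneg h0).symm
        have hbound : p + 7 ≤ s.length := by
          have := h1.length_le
          simp only [List.length_drop, hM7] at this
          omega
        have hq : PySem.Chars.findFrom s ['_'] ((p : Nat) : Int) = -1 := by
          rw [PySem.Chars.findFrom_natCast s ['_'] p (by omega)]
          rw [find_sep_none (s.drop p) (fun hc => hm ((List.drop_subset p s) hc))]
          simp
        rw [keptC_eval s p hp (s.length : Int) (by rw [hq]; norm_num)]
        by_cases hsM : s = mnM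
        case pos =>
          have hp7 : PySem.Chars.find s mnM = 0 := by rw [hsM]; decide
          have hep : epC [s] = 0 := by simp [epC, hM, hsM, show PySem.Chars.isIn mnM mnM = true from by decide]
          rw [hep]
          rw [if_pos (And.intro (Or.inl (by omega)) (by rw [hsM]; simp [mnM]; omega))]
          rw [if_neg (by omega : ¬ (0 : Int) < ((p : Nat) : Int))]
          simp [List.intercalate]
        case neg =>
          have hep : epC [s] = 1 := by simp [epC, hM, hsM]
          rw [hep]
          have hcond : ¬ ((((p : Nat) : Int) = 0 ∨ s[(((p : Nat) : Int) - 1).toNat]? = some '_') ∧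
              (s.length : Int) = ((p : Nat) : Int) + 7) := by
            rintro ⟨hor, hlen7⟩
            rcases hor with hor | hor
            · have hp0 : p = 0 := by omega
              apply hsM
              apply (List.IsPrefix.eq_of_length _ (by omega)).symm
              rw [hp0] at h1; simpa using h1
            · exact hm (List.mem_of_getElem? hor)
          rw [if_neg hcond]
          simp [List.intercalate, List.take_of_length_le]
    case pos =>
      obtain ⟨ch, t, he, hn, -⟩ := exists_decomp s hm
      subst he
      rw [epN, splitU_append _ _ hn]
      have hLlen : (ch ++ '_' :: t).length = ch.length + 1 + t.length := by simp; omega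
      have hchpre : ch <+: ch ++ '_' :: t := List.prefix_append ch _
      by_cases hMc : PySem.Chars.isIn mnM ch = true
      case pos =>
        have h0c : 0 ≤ PySem.Chars.find ch mnM :=
          (PySem.Chars.find_nonneg_iff ch mnM).mpr ((PySem.Chars.isIn_iff_infix mnM ch).mp hMc)
        obtain ⟨h1c, h2c⟩ := PySem.Chars.find_spec h0c
        set pc : Nat := (PySem.Chars.find ch mnM).toNat with hpcdef
        have hpc : PySem.Chars.find ch mnM = (pc : Int) := (Int.toNat_of_nonneg h0c).symm
        have hbound : pc + 7 ≤ ch.length := by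
          have := h1c.length_le
          simp only [List.length_drop, hM7] at this
          omega
        have hp : PySem.Chars.find (ch ++ '_' :: t) mnM = (pc : Int) := by
          rw [find_confine ch _ hchpre h0c, hpc]
        have hq : PySem.Chars.findFrom (ch ++ '_' :: t) ['_'] ((pc : Nat) : Int) = (ch.length : Int) := by
          rw [PySem.Chars.findFrom_natCast _ ['_'] pc (by rw [hLlen]; omega)]
          rw [List.drop_append_of_le_length (by omega)]
          rw [find_sep_append _ _ (fun hc => hn ((List.drop_subset pc ch) hc))]
          rw [if_neg (by simp)]
          simp [List.length_drop]; omega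
        rw [keptC_eval _ pc hp (ch.length : Int) (by rw [hq, if_neg (by omega)])]
        by_cases hch : ch = mnM
        case pos =>
          have hpc0 : pc = 0 := by
            have : PySem.Chars.find ch mnM = 0 := by rw [hch]; decide
            omega
          have hch7 : ch.length = 7 := by rw [hch]; rfl
          have hep : epC (ch :: splitU t) = 0 := by simp [epC, hMc, hch, show PySem.Chars.isIn mnM mnM = true from by decide]
          rw [hep]
          rw [if_pos (And.intro (Or.inl (by omega)) (by omega))]
          rw [if_neg (by omega : ¬ (0 : Int) < ((pc : Nat) : Int))]
          simp [List.intercalate]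
        case neg =>
          have hep : epC (ch :: splitU t) = 1 := by simp [epC, hMc, hch]
          rw [hep]
          have htake : (ch :: splitU t).take 1 = [ch] := rfl
          rw [htake]
          have hcond : ¬ ((((pc : Nat) : Int) = 0 ∨ (ch ++ '_' :: t)[(((pc : Nat) : Int) - 1).toNat]? = some '_') ∧
              (ch.length : Int) = ((pc : Nat) : Int) + 7) := by
            rintro ⟨hor, hlen7⟩
            rcases hor with hor | hor
            · apply hch
              apply (List.IsPrefix.eq_of_length _ (by omega)).symm
              have hpc0 : pc = 0 := by omega
              rw [hpc0] at h1c; simpa using h1c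
            · have hidx : (((pc : Nat) : Int) - 1).toNat < ch.length := by omega
              rw [getElem?_left ch t _ hidx] at hor
              injection hor with hh
              exact hn (hh ▸ List.getElem_mem hidx)
          rw [if_neg hcond]
          rw [show ((ch.length : Int)).toNat = ch.length from by omega]
          rw [show (ch ++ '_' :: t).take ch.length = ch from by
            rw [show ch ++ '_' :: t = ch ++ ('_' :: t) from rfl, List.take_left]]
          simp [List.intercalate]
      case neg =>
        have hMc' : ¬ mnM <:+: ch := fun hi => hMc ((PySem.Chars.isIn_iff_infix mnM ch).mpr hi)
        have hshift := find_shift ch t hMc'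
        by_cases hMt : PySem.Chars.find t mnM = -1
        case pos =>
          have hp : PySem.Chars.find (ch ++ '_' :: t) mnM = -1 := by rw [hshift, if_pos hMt]
          have hfull : epC (splitU t) = (splitU t).length := by
            apply epC_full
            intro c hc hcin
            have : mnM <:+: t :=
              (((PySem.Chars.isIn_iff_infix mnM c).mp hcin)).trans (chunks_infix t c hc)
            exact ((PySem.Chars.find_eq_neg_one_iff t mnM).mp hMt) this
          have hep : epC (ch :: splitU t) = 1 + (splitU t).length := by
            simp [epC, hMc, hfull]
          rw [hep]
          rw [List.take_of_length_le (by simp)]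
          rw [inter_cons _ _ (splitU_ne_nil t), roundtrip t]
          simp [keptC, hp]
        case neg =>
          have h0t : 0 ≤ PySem.Chars.find t mnM := by
            have := PySem.Chars.neg_one_le_find t mnM; omega
          obtain ⟨h1t, h2t⟩ := PySem.Chars.find_spec h0t
          obtain ⟨pt, hpt⟩ : ∃ k : Nat, PySem.Chars.find t mnM = (k : Int) :=
            ⟨(PySem.Chars.find t mnM).toNat, (Int.toNat_of_nonneg h0t).symm⟩
          rw [hpt] at h1t h2t
          simp only [Int.toNat_natCast] at h1t h2t
          have hboundt : pt + 7 ≤ t.length := by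
            have := h1t.length_le
            simp only [List.length_drop, hM7] at this
            omega
          have hp : PySem.Chars.find (ch ++ '_' :: t) mnM = ((ch.length + 1 + pt : Nat) : Int) := by
            rw [hshift, if_neg hMt, hpt]; push_cast; ring
          obtain ⟨f, hf⟩ : ∃ v : Int, PySem.Chars.find (t.drop pt) ['_'] = v := ⟨_, rfl⟩
          have hfge : -1 ≤ f := hf ▸ PySem.Chars.neg_one_le_find _ _
          have hflen : f ≤ (t.length : Int) - pt := by
            have := hf ▸ PySem.Chars.find_le_length (t.drop pt) ['_']
            simp only [List.length_drop] at this
            push_cast at this ⊢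
            omega
          have hq_s : PySem.Chars.findFrom (ch ++ '_' :: t) ['_'] ((ch.length + 1 + pt : Nat) : Int) =
              (if f = -1 then -1 else ((ch.length + 1 + pt : Nat) : Int) + f) := by
            rw [PySem.Chars.findFrom_natCast _ ['_'] _ (by rw [hLlen]; omega)]
            rw [drop_mid ch t pt, hf]
          have hq_t : PySem.Chars.findFrom t ['_'] ((pt : Nat) : Int) =
              (if f = -1 then -1 else ((pt : Nat) : Int) + f) := by
            rw [PySem.Chars.findFrom_natCast t ['_'] pt (by omega), hf]
          set Et : Int := if f = -1 then (t.length : Int) else (pt : Int) + f with hEtdef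
          have hEt0 : 0 ≤ Et := by
            rw [hEtdef]; split_ifs <;> omega
          have hEtle : Et ≤ (t.length : Int) := by
            rw [hEtdef]; split_ifs <;> omega
          have hes : (if PySem.Chars.findFrom (ch ++ '_' :: t) ['_'] ((ch.length + 1 + pt : Nat) : Int) < 0
              then ((ch ++ '_' :: t).length : Int)
              else PySem.Chars.findFrom (ch ++ '_' :: t) ['_'] ((ch.length + 1 + pt : Nat) : Int)) =
              (ch.length : Int) + 1 + Et := by
            rw [hq_s, hEtdef]
            by_cases hfc : f = -1
            · rw [if_pos hfc, if_pos (by omega), if_pos hfc, hLlen]; push_cast; ring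
            · rw [if_neg hfc, if_neg (by omega), if_neg hfc]; push_cast; ring
          have het : (if PySem.Chars.findFrom t ['_'] ((pt : Nat) : Int) < 0
              then ((t.length) : Int)
              else PySem.Chars.findFrom t ['_'] ((pt : Nat) : Int)) = Et := by
            rw [hq_t, hEtdef]
            by_cases hfc : f = -1
            · rw [if_pos hfc, if_pos (by omega), if_pos hfc]
            · rw [if_neg hfc, if_neg (by omega), if_neg hfc]
          obtain ⟨h0, r, hsp⟩ : ∃ h0 r, splitU t = h0 :: r := by
            cases hq' : splitU t with
            | nil => exact absurd hq' (splitU_ne_nil t)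
            | cons a b => exact ⟨a, b, rfl⟩
          -- if the marker field of t sits at the very front, t's first chunk is the marker itself
          have hhead : pt = 0 → Et = 7 → h0 = mnM := by
            intro hpt0 het7
            have hpre : mnM <+: t := by
              rw [hpt0] at h1t; simpa using h1t
            have hdt : t.drop pt = t := by rw [hpt0]; exact List.drop_zero
            rw [hEtdef] at het7
            by_cases hfc : f = -1
            · rw [if_pos hfc] at het7
              have htm : t = mnM := (List.IsPrefix.eq_of_length hpre (by omega)).symm
              rw [htm] at hsp
              rw [show splitU mnM = [mnM] from by rfl] at hsp
              injection hsp with hh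
              exact hh.symm
            · rw [if_neg hfc, hpt0] at het7
              have hft : PySem.Chars.find t ['_'] = ((7 : Nat) : Int) := by
                conv_lhs => rw [← hdt]
                rw [hf]; push_cast at het7 ⊢; omega
              obtain ⟨hdec, hnmem⟩ := sep_decomp t 7 hft
              have htake7 : t.take 7 = mnM := by
                have := List.prefix_iff_eq_take.mp hpre
                rw [hM7] at this; exact this.symm
              rw [htake7] at hdec
              have hspt : splitU t = mnM :: splitU (t.drop (7 + 1)) := by
                conv_lhs => rw [hdec]
                exact splitU_append _ _ (by decide)
              rw [hsp] at hspt; injection hspt with hh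
          by_cases hh0 : h0 = mnM
          case pos =>
            -- A keeps exactly [ch]; B's marker field is the bare marker, cut before its '_'
            have hpt0 : pt = 0 := by
              obtain ⟨hh0n, hcase⟩ := splitU_head t h0 r hsp
              subst hh0
              rcases hcase with hcase | ⟨t2, hcase⟩
              · have : PySem.Chars.find t mnM = 0 := by rw [hcase]; decide
                omega
              · have : PySem.Chars.find t mnM = ((0 : Nat) : Int) := by
                  apply find_eq_of
                  · rw [List.drop_zero, hcase]; exact List.prefix_append mnM _
                  · intro i hi; omega
                omega
            have hEt7 : Et = 7 := by
              obtain ⟨hh0n, hcase⟩ := splitU_head t h0 r hsp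
              subst hh0
              have hdt : t.drop pt = t := by rw [hpt0]; exact List.drop_zero
              rcases hcase with hcase | ⟨t2, hcase⟩
              · have hfv : f = -1 := by
                  rw [← hf]
                  conv_lhs => rw [hdt]
                  rw [hcase]; decide
                rw [hEtdef, if_pos hfv, hcase]; rfl
              · have hfv : f = 7 := by
                  rw [← hf]
                  conv_lhs => rw [hdt]
                  rw [hcase, find_sep_append mnM t2 (by decide), hM7]
                  norm_num
                rw [hEtdef, if_neg (by omega)]; omega
            have hep : epC (ch :: splitU t) = 1 := by
              rw [hsp, hh0]
              simp [epC, hMc, show PySem.Chars.isIn mnM mnM = true from by decide]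
            rw [hep]
            have htake : (ch :: splitU t).take 1 = [ch] := rfl
            rw [htake]
            rw [keptC_eval _ (ch.length + 1 + pt) hp ((ch.length : Int) + 1 + Et) hes]
            have hidx : ((((ch.length + 1 + pt : Nat) : Int)) - 1).toNat = ch.length := by omega
            have hcond : (((ch.length + 1 + pt : Nat) : Int) = 0 ∨
                (ch ++ '_' :: t)[((((ch.length + 1 + pt : Nat) : Int)) - 1).toNat]? = some '_') ∧
                ((ch.length : Int) + 1 + Et) = ((ch.length + 1 + pt : Nat) : Int) + 7 := by
              constructor
              · right; rw [hidx]; exact getElem?_mid ch t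
              · rw [hEt7]; push_cast; omega
            rw [if_pos hcond, if_pos (by omega : (0 : Int) < ((ch.length + 1 + pt : Nat) : Int))]
            rw [hidx]
            rw [show (ch ++ '_' :: t).take ch.length = ch from by
              rw [show ch ++ '_' :: t = ch ++ ('_' :: t) from rfl, List.take_left]]
            simp [List.intercalate]
          case neg =>
            have hkge : 1 ≤ epC (splitU t) := by
              rcases Nat.eq_zero_or_pos (epC (splitU t)) with hz | hpos
              · rw [hsp] at hz
                exact absurd ((epC_zero_iff h0 r).mp hz) hh0
              · omega
            have hep : epC (ch :: splitU t) = epC (splitU t) + 1 := by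
              simp [epC, hMc]; omega
            rw [hep, List.take_succ_cons]
            have htne : (splitU t).take (epC (splitU t)) ≠ [] := by
              cases hk : epC (splitU t) with
              | zero => omega
              | succ k => rw [hsp]; simp
            rw [inter_cons _ _ htne]
            have hiht := ih t (by rw [hLlen] at hlen; omega)
            rw [epN] at hiht
            rw [hiht]
            rw [keptC_eval t pt hpt Et het]
            rw [keptC_eval _ (ch.length + 1 + pt) hp ((ch.length : Int) + 1 + Et) hes]
            by_cases hct : (((pt : Nat) : Int) = 0 ∨ t[(((pt : Nat) : Int) - 1).toNat]? = some '_') ∧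
                Et = ((pt : Nat) : Int) + 7
            case pos =>
              have hpt1 : 1 ≤ pt := by
                by_contra h'
                exact hh0 (hhead (by omega) (by have := hct.2; omega))
              have hidx : ((((ch.length + 1 + pt : Nat) : Int)) - 1).toNat = ch.length + 1 + (pt - 1) := by
                omega
              have hcs : (((ch.length + 1 + pt : Nat) : Int) = 0 ∨
                  (ch ++ '_' :: t)[((((ch.length + 1 + pt : Nat) : Int)) - 1).toNat]? = some '_') := by
                right
                rw [hidx, getElem?_right ch t (pt - 1)]
                rcases hct.1 with h' | h'
                · omega
                · rwa [show (((pt : Nat) : Int) - 1).toNat = pt - 1 from by omega] at h'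
              rw [if_pos hct]
              rw [if_pos (And.intro hcs (by have := hct.2; push_cast at this ⊢; omega))]
              rw [if_pos (by omega : (0 : Int) < ((ch.length + 1 + pt : Nat) : Int))]
              rw [if_pos (by omega : (0 : Int) < ((pt : Nat) : Int))]
              rw [hidx, take_step ch t (pt - 1)]
              rw [show (((pt : Nat) : Int) - 1).toNat = pt - 1 from by omega]
            case neg =>
              rw [if_neg hct]
              have hcsneg : ¬ ((((ch.length + 1 + pt : Nat) : Int) = 0 ∨
                  (ch ++ '_' :: t)[((((ch.length + 1 + pt : Nat) : Int)) - 1).toNat]? = some '_') ∧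
                  ((ch.length : Int) + 1 + Et) = ((ch.length + 1 + pt : Nat) : Int) + 7) := by
                rintro ⟨hor, hE7⟩
                apply hct
                constructor
                · rcases hor with h' | h'
                  · exact absurd h' (by omega)
                  · by_cases hpt0 : pt = 0
                    · left; exact_mod_cast congrArg Nat.cast hpt0
                    · right
                      rw [show ((((ch.length + 1 + pt : Nat) : Int)) - 1).toNat
                          = ch.length + 1 + (pt - 1) from by omega] at h'
                      rw [getElem?_right ch t (pt - 1)] at h'
                      rwa [show (((pt : Nat) : Int) - 1).toNat = pt - 1 from by omega]
                · push_cast at hE7 ⊢; omega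
              rw [if_neg hcsneg]
              rw [show ((ch.length : Int) + 1 + Et).toNat = ch.length + 1 + Et.toNat from by omega]
              rw [take_step ch t Et.toNat]

theorem main_kept (s : List Char) :
    List.intercalate ['_'] ((splitU s).take (epN s)) = keptC s :=
  main_fuel s.length s le_rfl

-- ===== bridging the ports to the char-level facts =====

theorem ofList_eq_iff (c : List Char) (s : String) : String.ofList c = s ↔ c = s.toList := by
  constructor
  · intro h; rw [← h, String.toList_ofList]
  · intro h; subst h; exact String.ofList_toList

theorem isIn_ofList (c : List Char) :
    PySem.Str.isIn "TuneCP5" (String.ofList c) = PySem.Chars.isIn mnM c := by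
  simp [PySem.Str.isIn_eq, mnM]

theorem loopA_fst (o : String) (l : List (List Char)) (ep : Int) (ex : String) :
    (mnLoopA o (l.map String.ofList) ep ex).1 = ep + (epC l : Int) := by
  induction l generalizing ep ex with
  | nil => simp [mnLoopA, epC]
  | cons c cs ih =>
    simp only [List.map_cons, mnLoopA, isIn_ofList]
    by_cases hin : PySem.Chars.isIn mnM c = true
    · rw [if_pos hin]
      by_cases hc : c = mnM
      · have h' : String.ofList c = "TuneCP5" := (ofList_eq_iff c _).mpr (by rw [hc]; rfl)
        rw [if_neg (fun hk => hk h')]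
        simp only [epC, if_pos hin, if_pos hc]
        simp
      · have h' : String.ofList c ≠ "TuneCP5" :=
          fun h => hc (by have := (ofList_eq_iff c _).mp h; rw [this]; rfl)
        rw [if_pos h']
        simp only [epC, if_pos hin, if_neg hc]
        simp
    · rw [if_neg hin, ih]
      simp only [epC, if_neg hin]
      push_cast; ring

theorem mnLoopA_snd_true (o : String) (h : PySem.Str.isIn "erdON" o = true)
    (cs : List String) (ep : Int) :
    (mnLoopA o cs ep "_erdON").2 = "_erdON" := by
  simp at h
  induction cs generalizing ep with
  | nil => simp [mnLoopA]
  | cons c cs ih =>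
    by_cases hc : PySem.Str.isIn "TuneCP5" c = true <;> simp at hc <;>
      simp [mnLoopA, hc, h, ih]

theorem mnLoopA_snd_false (o : String) (h : PySem.Str.isIn "erdON" o = false)
    (cs : List String) (ep : Int) (ex : String) :
    (mnLoopA o cs ep ex).2 = ex := by
  simp at h
  induction cs generalizing ep with
  | nil => simp [mnLoopA]
  | cons c cs ih =>
    by_cases hc : PySem.Str.isIn "TuneCP5" c = true <;> simp at hc <;>
      simp [mnLoopA, hc, h, ih]

theorem mnLoopA_snd (o : String) (c : String) (cs : List String) (ep : Int) :
    (mnLoopA o (c :: cs) ep "").2 =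
      (if (!PySem.Str.isIn "TuneCP5" c) && PySem.Str.isIn "erdON" o then "_erdON" else "") := by
  by_cases hc : PySem.Str.isIn "TuneCP5" c = true <;> simp at hc
  · simp [mnLoopA, hc]
  · cases he : PySem.Str.isIn "erdON" o with
    | false =>
      have he' := he; simp at he'
      simp [mnLoopA, hc, he', mnLoopA_snd_false o he]
    | true =>
      have he' := he; simp at he'
      simp [mnLoopA, hc, he', mnLoopA_snd_true o he]

theorem splitU_head_takeWhile (s : List Char) :
    ∃ r, splitU s = (s.takeWhile (fun c => c != '_')) :: r := by
  by_cases hm : '_' ∈ s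
  · obtain ⟨ch, t, he, hn, htw⟩ := exists_decomp s hm
    subst he
    rw [splitU_append _ _ hn, ← htw]
    exact ⟨_, rfl⟩
  · rw [splitU_no_sep s hm, takeWhile_no_sep s hm]
    exact ⟨[], rfl⟩

theorem slice_zero {α : Type} (xs : List α) (k : Nat) :
    PySem.List.slice xs (some 0) (some (k : Int)) = xs.take k := by
  have := PySem.List.slice_natCast xs 0 k
  simpa using this

theorem join_take (l : List (List Char)) (k : Nat) :
    PySem.Str.join "_" ((l.map String.ofList).take k) =
      String.ofList (List.intercalate ['_'] (l.take k)) := by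
  unfold PySem.Str.join
  rw [← List.map_take, List.map_map]
  congr 1
  show PySem.Chars.join "_".toList (List.map (String.toList ∘ String.ofList) (l.take k)) = _
  rw [show String.toList ∘ String.ofList = id from funext (fun c => String.toList_ofList)]
  rw [List.map_id]
  rfl

-- A's value, in terms of the char-level kept prefix and A's loop extra
theorem A_eq (o : String) : makeNiceName o =
    PySem.Str.replace (String.ofList (keptC o.toList)) "_NLO" "" ++
      (mnLoopA o ((splitU o.toList).map String.ofList) 0 "").2 := by
  show PySem.Str.replace (PySem.Str.join "_" (PySem.List.slice ((PySem.Str.split? o "_").getD [])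
      (some 0) (some (mnLoopA o ((PySem.Str.split? o "_").getD []) 0 "").1))) "_NLO" "" ++
      (mnLoopA o ((PySem.Str.split? o "_").getD []) 0 "").2 = _
  rw [chunks_eq o]
  have h1 : (mnLoopA o ((splitU o.toList).map String.ofList) 0 "").1 = ((epN o.toList : Nat) : Int) := by
    rw [loopA_fst]; simp [epN]
  rw [h1, slice_zero, join_take, main_kept]

-- B's value, in terms of the same kept prefix
theorem keptB_eq (o : String) :
    (if PySem.Str.find o "TuneCP5" < 0 then o
     else
       if (PySem.Str.find o "TuneCP5" = 0 ∨
             PySem.Str.pyGet? o (PySem.Str.find o "TuneCP5" - 1) = some '_') ∧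
           (if PySem.Str.findFrom o "_" (PySem.Str.find o "TuneCP5") < 0 then PySem.Str.len o
            else PySem.Str.findFrom o "_" (PySem.Str.find o "TuneCP5")) =
             PySem.Str.find o "TuneCP5" + PySem.Str.len "TuneCP5" then
         (if 0 < PySem.Str.find o "TuneCP5" then
            PySem.Str.slice o none (some (PySem.Str.find o "TuneCP5" - 1)) else "")
       else
         PySem.Str.slice o none
           (some (if PySem.Str.findFrom o "_" (PySem.Str.find o "TuneCP5") < 0 then PySem.Str.len o
                  else PySem.Str.findFrom o "_" (PySem.Str.find o "TuneCP5"))))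
    = String.ofList (keptC o.toList) := by
  have hfind : PySem.Str.find o "TuneCP5" = PySem.Chars.find o.toList mnM := rfl
  by_cases hneg : PySem.Chars.find o.toList mnM < 0
  · rw [if_pos (by rw [hfind]; exact hneg)]
    rw [show keptC o.toList = o.toList from by rw [keptC, if_pos hneg]]
    exact (String.ofList_toList).symm
  · rw [if_neg (by rw [hfind]; exact hneg)]
    obtain ⟨pn, hpn⟩ : ∃ k : Nat, PySem.Chars.find o.toList mnM = (k : Int) :=
      ⟨_, (Int.toNat_of_nonneg (by omega)).symm⟩
    have hkc : keptC o.toList =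
        (if (((pn : Nat) : Int) = 0 ∨ o.toList[(((pn : Nat) : Int) - 1).toNat]? = some '_') ∧
            (if PySem.Chars.findFrom o.toList ['_'] ((pn : Nat) : Int) < 0 then (o.toList.length : Int)
             else PySem.Chars.findFrom o.toList ['_'] ((pn : Nat) : Int)) = ((pn : Nat) : Int) + 7
         then (if 0 < ((pn : Nat) : Int) then o.toList.take (((pn : Nat) : Int) - 1).toNat else [])
         else o.toList.take ((if PySem.Chars.findFrom o.toList ['_'] ((pn : Nat) : Int) < 0
             then (o.toList.length : Int)
             else PySem.Chars.findFrom o.toList ['_'] ((pn : Nat) : Int))).toNat) := by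
      rw [keptC_eval o.toList pn hpn _ rfl]
    rw [hkc]
    have hfrom : PySem.Str.findFrom o "_" (PySem.Str.find o "TuneCP5") =
        PySem.Chars.findFrom o.toList ['_'] ((pn : Nat) : Int) := by
      rw [hfind, hpn]; rfl
    have hq0 : 0 ≤ (if PySem.Chars.findFrom o.toList ['_'] ((pn : Nat) : Int) < 0
        then (o.toList.length : Int) else PySem.Chars.findFrom o.toList ['_'] ((pn : Nat) : Int)) := by
      split_ifs with h' <;> omega
    have hlen7 : PySem.Str.len "TuneCP5" = 7 := rfl
    have hlen : PySem.Str.len o = (o.toList.length : Int) := rfl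
    have hcond_iff : ((PySem.Str.find o "TuneCP5" = 0 ∨
          PySem.Str.pyGet? o (PySem.Str.find o "TuneCP5" - 1) = some '_') ∧
          (if PySem.Str.findFrom o "_" (PySem.Str.find o "TuneCP5") < 0 then PySem.Str.len o
           else PySem.Str.findFrom o "_" (PySem.Str.find o "TuneCP5")) =
            PySem.Str.find o "TuneCP5" + PySem.Str.len "TuneCP5") ↔
        ((((pn : Nat) : Int) = 0 ∨ o.toList[(((pn : Nat) : Int) - 1).toNat]? = some '_') ∧
          (if PySem.Chars.findFrom o.toList ['_'] ((pn : Nat) : Int) < 0 then (o.toList.length : Int)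
           else PySem.Chars.findFrom o.toList ['_'] ((pn : Nat) : Int)) = ((pn : Nat) : Int) + 7) := by
      rw [hfrom, hfind, hpn, hlen7, hlen]
      constructor
      · rintro ⟨hor, he⟩
        refine ⟨?_, he⟩
        rcases hor with h' | h'
        · exact Or.inl h'
        · by_cases hz : pn = 0
          · exact Or.inl (by exact_mod_cast congrArg Nat.cast hz)
          · right
            rw [show PySem.Str.pyGet? o ((pn : Int) - 1) =
                PySem.List.pyGet? o.toList ((pn - 1 : Nat) : Int) from by
              rw [show ((pn : Int) - 1) = ((pn - 1 : Nat) : Int) from by omega]; rfl] at h'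
            rw [PySem.List.pyGet?_natCast] at h'
            rwa [show (((pn : Nat) : Int) - 1).toNat = pn - 1 from by omega]
      · rintro ⟨hor, he⟩
        refine ⟨?_, he⟩
        rcases hor with h' | h'
        · exact Or.inl h'
        · by_cases hz : pn = 0
          · exact Or.inl (by exact_mod_cast congrArg Nat.cast hz)
          · right
            rw [show PySem.Str.pyGet? o ((pn : Int) - 1) =
                PySem.List.pyGet? o.toList ((pn - 1 : Nat) : Int) from by
              rw [show ((pn : Int) - 1) = ((pn - 1 : Nat) : Int) from by omega]; rfl]
            rw [PySem.List.pyGet?_natCast]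
            rwa [show (((pn : Nat) : Int) - 1).toNat = pn - 1 from by omega] at h'
    by_cases hc : (((pn : Nat) : Int) = 0 ∨ o.toList[(((pn : Nat) : Int) - 1).toNat]? = some '_') ∧
        (if PySem.Chars.findFrom o.toList ['_'] ((pn : Nat) : Int) < 0 then (o.toList.length : Int)
         else PySem.Chars.findFrom o.toList ['_'] ((pn : Nat) : Int)) = ((pn : Nat) : Int) + 7
    · rw [if_pos (hcond_iff.mpr hc), if_pos hc]
      by_cases hz : 0 < ((pn : Nat) : Int)
      · rw [if_pos (by rw [hfind, hpn]; exact hz), if_pos hz]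
        show String.ofList (PySem.Chars.slice o.toList none (some (PySem.Str.find o "TuneCP5" - 1))) = _
        rw [hfind, hpn, PySem.Chars.slice_eq_listSlice,
          PySem.List.slice_to o.toList (by omega : (0:Int) ≤ (pn : Int) - 1)]
      · rw [if_neg (by rw [hfind, hpn]; exact hz), if_neg hz]
    · rw [if_neg (fun h' => hc (hcond_iff.mp h')), if_neg hc]
      show String.ofList (PySem.Chars.slice o.toList none (some _)) = _
      rw [PySem.Chars.slice_eq_listSlice]
      rw [show (if PySem.Str.findFrom o "_" (PySem.Str.find o "TuneCP5") < 0 then PySem.Str.len o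
           else PySem.Str.findFrom o "_" (PySem.Str.find o "TuneCP5")) =
          (if PySem.Chars.findFrom o.toList ['_'] ((pn : Nat) : Int) < 0 then (o.toList.length : Int)
           else PySem.Chars.findFrom o.toList ['_'] ((pn : Nat) : Int)) from by rw [hfrom, hlen]]
      rw [PySem.List.slice_to o.toList hq0]

theorem altB_eq (o : String) : makeNiceName_alt o =
    PySem.Str.replace (String.ofList (keptC o.toList)) "_NLO" "" ++
      (if PySem.Str.isIn "erdON" o then "_erdON" else "") := by
  simp only [makeNiceName_alt]
  rw [keptB_eq]

-- ===== VERDICT =====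
theorem makeNiceName_spec : Claim_unchanged_makeNiceName := by
  intro o _
  unfold Spec_makeNiceName
  intro hD
  rw [A_eq, altB_eq]
  congr 1
  obtain ⟨r, hsp⟩ := splitU_head_takeWhile o.toList
  rw [hsp, List.map_cons, mnLoopA_snd, isIn_ofList]
  by_cases herd : PySem.Str.isIn "erdON" o = true
  · have hfc : PySem.Chars.isIn "TuneCP5".toList (o.toList.takeWhile (fun c => c != '_')) = false := by
      cases h : PySem.Chars.isIn "TuneCP5".toList (o.toList.takeWhile (fun c => c != '_')) with
      | true => exact absurd (And.intro herd h) hD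
      | false => rfl
    rw [show mnM = "TuneCP5".toList from rfl, hfc]
    simp [herd]
  · have herd' : PySem.Str.isIn "erdON" o = false := by
      cases h : PySem.Str.isIn "erdON" o with
      | true => exact absurd h herd
      | false => rfl
    rw [herd']
    simp
theorem makeNiceName_changed : Claim_changed_makeNiceName := by
  unfold Claim_changed_makeNiceName; decide
theorem makeNiceName_tight : Claim_exact_makeNiceName := by
  intro o _ hD
  obtain ⟨herd, hfirst⟩ := hD
  rw [A_eq, altB_eq]
  obtain ⟨r, hsp⟩ := splitU_head_takeWhile o.toList
  rw [hsp, List.map_cons, mnLoopA_snd, isIn_ofList,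
    show mnM = "TuneCP5".toList from rfl, hfirst, if_pos herd]
  simp only [Bool.not_true, Bool.false_and, if_false]
  intro heq
  have hlen := congrArg (fun s => s.toList.length) heq
  simp only [String.toList_append] at hlen
  simp at hlen
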